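-- pv_equiv track=rewrite | github.com/HubertNdunyo/JiraDataXl | core/jira/jira_issues.py | _format_error_summary
-- ===== SOURCE A (Python) =====
-- def _format_error_summary(errors):
--     """Format error summary to avoid duplicate messages."""
--     if not errors:
--         return ""
--
--     error_counts = {}
--     for error in errors:
--         error_counts[error] = error_counts.get(error, 0) + 1
--
--     summary = []
--     for error, count in error_counts.items():
--         if count > 1:
--             summary.append(f"{error} (x{count})")
--         else:
--             summary.append(error)
--
--     return "\n".join(summary)
-- ===== SOURCE B (Python) =====
-- def _format_error_summary(errors):
--     """Format error summary to avoid duplicate messages."""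
--     if not errors:
--         return ""
--     lines = []
--     work = errors
--     while work:
--         head = work[0]
--         rest = [e for e in work[1:] if e != head]
--         count = len(work) - len(rest)
--         lines.append(f"{head} (x{count})" if count > 1 else head)
--         work = rest
--     return "\n".join(lines)
-- ===== Notes on version B (the rewrite author's own statement) =====
-- stated objective: alternative
-- what changed: Replaces A's counting dict plus a second formatting loop by a partition loop: repeatedly peel the first error and all its duplicates off the work list (the count falls out of the length difference), emit its line, and continue on the remainder.
import Mathlib
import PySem

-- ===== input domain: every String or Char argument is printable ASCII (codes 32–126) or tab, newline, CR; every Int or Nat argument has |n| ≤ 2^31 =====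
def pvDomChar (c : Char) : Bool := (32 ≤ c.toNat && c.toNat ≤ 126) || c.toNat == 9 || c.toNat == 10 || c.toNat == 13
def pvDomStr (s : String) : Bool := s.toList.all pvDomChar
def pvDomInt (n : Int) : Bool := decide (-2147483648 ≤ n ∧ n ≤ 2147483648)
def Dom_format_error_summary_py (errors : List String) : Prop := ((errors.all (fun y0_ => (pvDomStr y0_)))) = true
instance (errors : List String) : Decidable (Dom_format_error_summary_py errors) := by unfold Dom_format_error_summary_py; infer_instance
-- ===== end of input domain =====

-- B replaces A's counting-dict-plus-formatting-loop by a partition loop: repeatedly peel off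
-- the first error and all its duplicates from the work list (the count is the length
-- difference) and emit its line (alternative algorithm, same output).

-- ===== PORT A =====
def format_error_summary_py (errors : List String) : String :=
  if errors = [] then ""
  else
    let error_counts : PySem.Dict String Int :=
      errors.foldl (fun d e => d.insert e (d.getD e 0 + 1)) PySem.Dict.empty
    let summary : List String :=
      error_counts.items.foldl (fun s p =>
        if p.2 > 1 then s ++ [p.1 ++ " (x" ++ PySem.Int.toStr p.2 ++ ")"]
        else s ++ [p.1]) []
    PySem.Str.join "\n" summary

-- ===== PORT B =====
-- the while loop: peel off the first error and all its duplicates, append its line, continue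
def pvFesLoop (lines : List String) (work : List String) : List String :=
  match work with
  | [] => lines
  | head :: t =>
    let rest := t.filter (fun e => !(e == head))
    let count : Int := ((t.length + 1 : Nat) : Int) - (rest.length : Int)
    let line := if count > 1 then head ++ " (x" ++ PySem.Int.toStr count ++ ")" else head
    pvFesLoop (lines ++ [line]) rest
termination_by work.length
decreasing_by
  simp only [List.length_cons, List.length_unattach]
  exact Nat.lt_succ_of_le (le_trans (List.length_filter_le _ _) (by simp))

def format_error_summary_py_alt (errors : List String) : String :=
  if errors = [] then ""
  else PySem.Str.join "\n" (pvFesLoop [] errors)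

-- ===== PRECONDITION & SPEC =====
def Spec_format_error_summary_py (errors : List String) (out : String) : Prop := out = format_error_summary_py_alt errors
instance (errors : List String) (out : String) : Decidable (Spec_format_error_summary_py errors out) := by unfold Spec_format_error_summary_py; infer_instance

-- ===== CLAIM (what is proved, stated in full; the proofs are below) =====
def Claim_equal_format_error_summary_py : Prop := ∀ (errors : List String), Dom_format_error_summary_py errors → Spec_format_error_summary_py errors (format_error_summary_py errors)

-- ===== LEMMAS AND PROOFS =====

-- the per-error line both programs produce, as a function of the whole input list
def pvFmt (xs : List String) (k : String) : String :=
  if ((xs.count k : Int)) > 1 then k ++ " (x" ++ PySem.Int.toStr (xs.count k : Int) ++ ")" else k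

-- A's second loop appends one element per item, chosen by the branch: it is acc ++ map.
theorem pv_foldl_append_if_else {α β : Type} (l : List α) (acc : List β)
    (c : α → Prop) [DecidablePred c] (f g : α → β) :
    l.foldl (fun s p => if c p then s ++ [f p] else s ++ [g p]) acc
      = acc ++ l.map (fun p => if c p then f p else g p) := by
  induction l generalizing acc with
  | nil => simp
  | cons x xs ih =>
    simp only [List.foldl_cons, List.map_cons]
    by_cases h : c x <;> simp [h, ih, List.append_assoc]

-- A computes join over the first-seen distinct errors, each formatted by pvFmt.
theorem pv_A_norm (xs : List String) (h : xs ≠ []) :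
    format_error_summary_py xs
      = PySem.Str.join "\n" ((PySem.Set.ofList xs).map (pvFmt xs)) := by
  unfold format_error_summary_py
  simp only [if_neg h]
  rw [PySem.Dict.foldl_insert_getD_add_one_eq_counter, PySem.Dict.items_counter,
    pv_foldl_append_if_else]
  simp only [List.map_map, Function.comp_def, gt_iff_lt, List.nil_append]
  rfl

-- Set.ofList commutes with filter.
theorem pv_ofList_filter (xs : List String) (p : String → Bool) :
    PySem.Set.ofList (xs.filter p) = List.filter p (PySem.Set.ofList xs) := by
  induction xs with
  | nil => simp [PySem.Set.ofList_nil]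
  | cons x xs ih =>
    rw [PySem.Set.ofList_cons]
    cases hp : p x with
    | false =>
      rw [show List.filter p (x :: xs) = List.filter p xs from by simp [hp], ih]
      simp only [PySem.Set.discard, List.filter_cons, hp, Bool.false_eq_true, if_false,
        List.filter_filter]
      apply List.filter_congr
      intro a _
      by_cases hax : a = x
      · subst hax; simp [hp]
      · simp [hax]
    | true =>
      rw [show List.filter p (x :: xs) = x :: List.filter p xs from by simp [hp],
        PySem.Set.ofList_cons, ih]
      simp only [PySem.Set.discard, List.filter_cons, hp, if_true, List.filter_filter]
      refine congrArg (x :: ·) (List.filter_congr ?_)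
      intro a _
      exact Bool.and_comm _ _

theorem pv_count_len (t : List String) (h : String) :
    t.count h + (t.filter (fun e => !(e == h))).length = t.length := by
  induction t with
  | nil => simp
  | cons x xs ih =>
    by_cases hx : x = h
    · subst hx; simp; omega
    · simp [hx]; omega

-- the loop appends, in first-seen order, one pvFmt line per distinct error of its work list
theorem pv_loop_norm : ∀ (n : Nat) (work : List String), work.length ≤ n →
    ∀ (lines : List String),
    pvFesLoop lines work = lines ++ (PySem.Set.ofList work).map (pvFmt work) := by
  intro n
  induction n with
  | zero =>
    intro work hlen lines
    cases work with
    | nil => simp [pvFesLoop, PySem.Set.ofList_nil]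
    | cons h t => simp at hlen
  | succ n ih =>
    intro work hlen lines
    cases work with
    | nil => simp [pvFesLoop, PySem.Set.ofList_nil]
    | cons h t =>
      rw [pvFesLoop]
      set rest := t.filter (fun e => !(e == h)) with hrest
      have hcnt : ((t.length + 1 : Nat) : Int) - (rest.length : Int)
          = (((h :: t).count h : Nat) : Int) := by
        have hc := pv_count_len t h
        rw [← hrest] at hc
        simp only [List.count_cons_self]
        push_cast
        omega
      have hline : (if ((t.length + 1 : Nat) : Int) - (rest.length : Int) > 1 then
            h ++ " (x" ++ PySem.Int.toStr (((t.length + 1 : Nat) : Int) - (rest.length : Int)) ++ ")"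
          else h) = pvFmt (h :: t) h := by
        rw [hcnt]; rfl
      have hof : PySem.Set.ofList (h :: t) = h :: PySem.Set.ofList rest := by
        rw [PySem.Set.ofList_cons, hrest, pv_ofList_filter]; rfl
      have hmap : (PySem.Set.ofList rest).map (pvFmt (h :: t))
          = (PySem.Set.ofList rest).map (pvFmt rest) := by
        apply List.map_congr_left
        intro e he
        have he' : e ∈ rest := (PySem.Set.mem_ofList _ _).mp he
        have hne' : ¬ (e == h) = true := by
          have := List.of_mem_filter he'
          simpa using this
        have heh : e ≠ h := by simpa using hne'
        have h1 : (h :: t).count e = t.count e := by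
          simp [Ne.symm heh]
        have h2 : rest.count e = t.count e := by
          rw [hrest]
          exact List.count_filter (by simpa using heh)
        unfold pvFmt
        rw [h1, ← h2]
      have hlen' : rest.length ≤ n := by
        have h1 : rest.length ≤ t.length := by
          rw [hrest]; exact List.length_filter_le _ _
        simp at hlen; omega
      rw [ih rest hlen', hline, hof, List.map_cons, hmap]
      simp

-- B computes the same join as A
theorem pv_B_norm (xs : List String) (h : xs ≠ []) :
    format_error_summary_py_alt xs
      = PySem.Str.join "\n" ((PySem.Set.ofList xs).map (pvFmt xs)) := by
  unfold format_error_summary_py_alt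
  rw [if_neg h, pv_loop_norm xs.length xs le_rfl [], List.nil_append]

-- ===== VERDICT (by name: the statement is the Claim_ definition above) =====
theorem format_error_summary_py_spec : Claim_equal_format_error_summary_py := by
  intro errors _
  unfold Spec_format_error_summary_py
  by_cases h : errors = []
  · subst h
    simp [format_error_summary_py, format_error_summary_py_alt]
  · rw [pv_A_norm errors h, pv_B_norm errors h]
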